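-- pv_equiv track=rewrite | github.com/starputzer/nscale-dms-assistent | api/integrate_all_endpoints.py | generate_router_registration_code
-- ===== SOURCE A (Python) =====
-- def generate_router_registration_code(endpoint_files):
--     """Generate code to register all routers"""
--     imports = []
--     registrations = []
--
--     # Group endpoints by category
--     categories = {
--         'admin': [],
--         'doc': [],
--         'rag': [],
--         'system': [],
--         'knowledge': [],
--         'background': [],
--         'other': []
--     }
--
--     for file in endpoint_files:
--         if file.startswith('admin_'):
--             categories['admin'].append(file)
--         elif 'doc' in file or 'document' in file:
--             categories['doc'].append(file)
--         elif 'rag' in file: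
--             categories['rag'].append(file)
--         elif 'system' in file or 'monitor' in file or 'performance' in file:
--             categories['system'].append(file)
--         elif 'knowledge' in file:
--             categories['knowledge'].append(file)
--         elif 'background' in file:
--             categories['background'].append(file)
--         else:
--             categories['other'].append(file)
--
--     # Generate imports
--     imports.append("# Import all endpoint routers")
--     for category, files in categories.items():
--         if files:
--             imports.append(f"\n# {category.upper()} endpoints")
--             for file in files:
--                 imports.append(f"try:")
--                 imports.append(f"    from api.{file} import router as {file}_router")
--                 imports.append(f"    logger.info('Loaded {file} router')")
--                 imports.append(f"except Exception as e:")
--                 imports.append(f"    logger.error(f'Failed to load {file}: {{e}}')")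
--                 imports.append(f"    {file}_router = None")
--
--     # Generate registrations
--     registrations.append("\n# Register all routers")
--     for category, files in categories.items():
--         if files:
--             registrations.append(f"\n# Register {category.upper()} endpoints")
--             for file in files:
--                 # Determine the prefix based on the endpoint type
--                 if file.startswith('admin_dashboard'):
--                     prefix = "/api/admin-dashboard"
--                 elif file.startswith('admin_'):
--                     prefix = "/api/admin"
--                 elif 'doc_converter' in file:
--                     prefix = "/api/doc-converter"
--                 elif 'document' in file:
--                     prefix = "/api/documents"
--                 elif 'rag' in file:
--                     prefix = "/api/rag"
--                 elif 'knowledge' in file: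
--                     prefix = "/api/knowledge"
--                 elif 'background' in file or 'processing' in file:
--                     prefix = "/api/background"
--                 elif 'system' in file or 'monitor' in file:
--                     prefix = "/api/system"
--                 elif 'performance' in file:
--                     prefix = "/api/performance"
--                 else:
--                     prefix = "/api"
--
--                 registrations.append(f"if {file}_router:")
--                 registrations.append(f"    app.include_router({file}_router, prefix=\"{prefix}\", tags=[\"{category}\"])")
--                 registrations.append(f"    logger.info('Registered {file} at {prefix}')")
--
--     return "\n".join(imports), "\n".join(registrations)
-- ===== SOURCE B (Python) =====
-- ORDER = [("admin", "ADMIN"), ("doc", "DOC"), ("rag", "RAG"),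
--          ("system", "SYSTEM"), ("knowledge", "KNOWLEDGE"),
--          ("background", "BACKGROUND"), ("other", "OTHER")]
--
--
-- def _classify(f):
--     if f.startswith('admin_'):
--         return 'admin'
--     if 'doc' in f or 'document' in f:
--         return 'doc'
--     if 'rag' in f:
--         return 'rag'
--     if 'system' in f or 'monitor' in f or 'performance' in f:
--         return 'system'
--     if 'knowledge' in f:
--         return 'knowledge'
--     if 'background' in f:
--         return 'background'
--     return 'other'
--
--
-- def _prefix(f):
--     if f.startswith('admin_dashboard'):
--         return "/api/admin-dashboard"
--     if f.startswith('admin_'):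
--         return "/api/admin"
--     if 'doc_converter' in f:
--         return "/api/doc-converter"
--     if 'document' in f:
--         return "/api/documents"
--     if 'rag' in f:
--         return "/api/rag"
--     if 'knowledge' in f:
--         return "/api/knowledge"
--     if 'background' in f or 'processing' in f:
--         return "/api/background"
--     if 'system' in f or 'monitor' in f:
--         return "/api/system"
--     if 'performance' in f:
--         return "/api/performance"
--     return "/api"
--
--
-- def _import_lines(f):
--     return [
--         "try:",
--         "    from api.%s import router as %s_router" % (f, f),
--         "    logger.info('Loaded %s router')" % f,
--         "except Exception as e:",
--         "    logger.error(f'Failed to load %s: {e}')" % f,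
--         "    %s_router = None" % f,
--     ]
--
--
-- def _reg_lines(f, category):
--     p = _prefix(f)
--     return [
--         "if %s_router:" % f,
--         '    app.include_router(%s_router, prefix="%s", tags=["%s"])' % (f, p, category),
--         "    logger.info('Registered %s at %s')" % (f, p),
--     ]
--
--
-- def generate_router_registration_code(endpoint_files):
--     groups = [(low, up, [f for f in endpoint_files if _classify(f) == low])
--               for low, up in ORDER]
--     imports = ["# Import all endpoint routers"] + [
--         line
--         for low, up, fs in groups if fs
--         for line in ["\n# %s endpoints" % up]
--         + [l for f in fs for l in _import_lines(f)]
--     ]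
--     registrations = ["\n# Register all routers"] + [
--         line
--         for low, up, fs in groups if fs
--         for line in ["\n# Register %s endpoints" % up]
--         + [l for f in fs for l in _reg_lines(f, low)]
--     ]
--     return "\n".join(imports), "\n".join(registrations)
-- ===== Notes on version B (the rewrite author's own statement) =====
-- stated objective: alternative
-- what changed: B replaces A's single-pass mutation of a dict-of-lists by a classify() helper, per-category filter passes over a fixed category table, and flat comprehension-style line building instead of nested append loops.
import Mathlib
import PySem

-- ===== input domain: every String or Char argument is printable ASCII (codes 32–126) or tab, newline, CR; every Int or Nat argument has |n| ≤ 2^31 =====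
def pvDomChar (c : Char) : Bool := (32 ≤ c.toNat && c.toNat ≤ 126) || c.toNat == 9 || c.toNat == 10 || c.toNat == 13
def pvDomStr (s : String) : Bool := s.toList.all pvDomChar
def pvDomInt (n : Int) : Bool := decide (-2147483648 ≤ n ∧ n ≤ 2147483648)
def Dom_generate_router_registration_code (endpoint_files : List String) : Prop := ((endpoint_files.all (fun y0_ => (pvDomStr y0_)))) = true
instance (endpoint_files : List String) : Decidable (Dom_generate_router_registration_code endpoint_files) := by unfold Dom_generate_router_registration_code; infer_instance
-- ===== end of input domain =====

-- B replaces A's one-pass dict-of-lists bucketing by a per-category filter over a fixed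
-- category table plus flatMap-style line building (objective: alternative decomposition).

-- ===== PORT A =====
-- the six lines A appends per file in the imports loop
def pvImpLines (file : String) : List String :=
  ["try:",
   "    from api." ++ file ++ " import router as " ++ file ++ "_router",
   "    logger.info('Loaded " ++ file ++ " router')",
   "except Exception as e:",
   "    logger.error(f'Failed to load " ++ file ++ ": {e}')",
   "    " ++ file ++ "_router = None"]

-- the three lines A appends per file in the registrations loop (prefix chain inlined by caller)
def pvRegLines (file prefixS category : String) : List String :=
  ["if " ++ file ++ "_router:",
   "    app.include_router(" ++ file ++ "_router, prefix=\"" ++ prefixS ++ "\", tags=[\"" ++ category ++ "\"])",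
   "    logger.info('Registered " ++ file ++ " at " ++ prefixS ++ "')"]

-- A's inline prefix elif chain
def pvPrefixA (file : String) : String :=
  if PySem.Str.startswith file "admin_dashboard" then "/api/admin-dashboard"
  else if PySem.Str.startswith file "admin_" then "/api/admin"
  else if PySem.Str.isIn "doc_converter" file then "/api/doc-converter"
  else if PySem.Str.isIn "document" file then "/api/documents"
  else if PySem.Str.isIn "rag" file then "/api/rag"
  else if PySem.Str.isIn "knowledge" file then "/api/knowledge"
  else if PySem.Str.isIn "background" file || PySem.Str.isIn "processing" file then "/api/background"
  else if PySem.Str.isIn "system" file || PySem.Str.isIn "monitor" file then "/api/system"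
  else if PySem.Str.isIn "performance" file then "/api/performance"
  else "/api"

def generate_router_registration_code (endpoint_files : List String) : String × String :=
  let imports : List String := []
  let registrations : List String := []
  let categories : PySem.Dict String (List String) :=
    PySem.Dict.ofList [("admin", []), ("doc", []), ("rag", []), ("system", []),
                       ("knowledge", []), ("background", []), ("other", [])]
  let categories := endpoint_files.foldl (fun d file =>
    if PySem.Str.startswith file "admin_" then d.modify "admin" [] (· ++ [file])
    else if PySem.Str.isIn "doc" file || PySem.Str.isIn "document" file then d.modify "doc" [] (· ++ [file])
    else if PySem.Str.isIn "rag" file then d.modify "rag" [] (· ++ [file])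
    else if PySem.Str.isIn "system" file || PySem.Str.isIn "monitor" file || PySem.Str.isIn "performance" file then d.modify "system" [] (· ++ [file])
    else if PySem.Str.isIn "knowledge" file then d.modify "knowledge" [] (· ++ [file])
    else if PySem.Str.isIn "background" file then d.modify "background" [] (· ++ [file])
    else d.modify "other" [] (· ++ [file])) categories
  let imports := imports ++ ["# Import all endpoint routers"]
  let imports := categories.items.foldl (fun acc cf =>
    if cf.2 ≠ [] then
      cf.2.foldl (fun a file => a ++ pvImpLines file)
        (acc ++ ["\n# " ++ PySem.Str.upper cf.1 ++ " endpoints"])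
    else acc) imports
  let registrations := registrations ++ ["\n# Register all routers"]
  let registrations := categories.items.foldl (fun acc cf =>
    if cf.2 ≠ [] then
      cf.2.foldl (fun a file => a ++ pvRegLines file (pvPrefixA file) cf.1)
        (acc ++ ["\n# Register " ++ PySem.Str.upper cf.1 ++ " endpoints"])
    else acc) registrations
  (PySem.Str.join "\n" imports, PySem.Str.join "\n" registrations)

-- ===== PORT B =====
def pvOrder : List (String × String) :=
  [("admin", "ADMIN"), ("doc", "DOC"), ("rag", "RAG"), ("system", "SYSTEM"),
   ("knowledge", "KNOWLEDGE"), ("background", "BACKGROUND"), ("other", "OTHER")]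

def pvClassify (f : String) : String :=
  if PySem.Str.startswith f "admin_" then "admin"
  else if PySem.Str.isIn "doc" f || PySem.Str.isIn "document" f then "doc"
  else if PySem.Str.isIn "rag" f then "rag"
  else if PySem.Str.isIn "system" f || PySem.Str.isIn "monitor" f || PySem.Str.isIn "performance" f then "system"
  else if PySem.Str.isIn "knowledge" f then "knowledge"
  else if PySem.Str.isIn "background" f then "background"
  else "other"

def generate_router_registration_code_alt (endpoint_files : List String) : String × String :=
  let groups := pvOrder.map (fun lu =>
    (lu.1, lu.2, endpoint_files.filter (fun f => pvClassify f == lu.1)))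
  let imports := "# Import all endpoint routers" ::
    groups.flatMap (fun g =>
      if g.2.2 = [] then []
      else ("\n# " ++ g.2.1 ++ " endpoints") :: g.2.2.flatMap pvImpLines)
  let registrations := "\n# Register all routers" ::
    groups.flatMap (fun g =>
      if g.2.2 = [] then []
      else ("\n# Register " ++ g.2.1 ++ " endpoints") ::
        g.2.2.flatMap (fun f => pvRegLines f (pvPrefixA f) g.1))
  (PySem.Str.join "\n" imports, PySem.Str.join "\n" registrations)

-- ===== PRECONDITION & SPEC =====
def Spec_generate_router_registration_code (endpoint_files : List String) (out : String × String) : Prop := out = generate_router_registration_code_alt endpoint_files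
instance (endpoint_files : List String) (out : String × String) : Decidable (Spec_generate_router_registration_code endpoint_files out) := by unfold Spec_generate_router_registration_code; infer_instance

-- ===== CLAIM (what is proved, stated in full; the proofs are below) =====
def Claim_equal_generate_router_registration_code : Prop := ∀ (endpoint_files : List String), Dom_generate_router_registration_code endpoint_files → Spec_generate_router_registration_code endpoint_files (generate_router_registration_code endpoint_files)

-- ===== LEMMAS AND PROOFS =====
theorem pv_mod_admin (vad vdo vra vsy vkn vba vot : List String) (g : List String → List String) :
    (PySem.Dict.mk [("admin", vad), ("doc", vdo), ("rag", vra), ("system", vsy), ("knowledge", vkn), ("background", vba), ("other", vot)]).modify "admin" [] g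
    = PySem.Dict.mk [("admin", g vad), ("doc", vdo), ("rag", vra), ("system", vsy), ("knowledge", vkn), ("background", vba), ("other", vot)] := rfl

theorem pv_mod_doc (vad vdo vra vsy vkn vba vot : List String) (g : List String → List String) :
    (PySem.Dict.mk [("admin", vad), ("doc", vdo), ("rag", vra), ("system", vsy), ("knowledge", vkn), ("background", vba), ("other", vot)]).modify "doc" [] g
    = PySem.Dict.mk [("admin", vad), ("doc", g vdo), ("rag", vra), ("system", vsy), ("knowledge", vkn), ("background", vba), ("other", vot)] := rfl

theorem pv_mod_rag (vad vdo vra vsy vkn vba vot : List String) (g : List String → List String) :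
    (PySem.Dict.mk [("admin", vad), ("doc", vdo), ("rag", vra), ("system", vsy), ("knowledge", vkn), ("background", vba), ("other", vot)]).modify "rag" [] g
    = PySem.Dict.mk [("admin", vad), ("doc", vdo), ("rag", g vra), ("system", vsy), ("knowledge", vkn), ("background", vba), ("other", vot)] := rfl

theorem pv_mod_system (vad vdo vra vsy vkn vba vot : List String) (g : List String → List String) :
    (PySem.Dict.mk [("admin", vad), ("doc", vdo), ("rag", vra), ("system", vsy), ("knowledge", vkn), ("background", vba), ("other", vot)]).modify "system" [] g
    = PySem.Dict.mk [("admin", vad), ("doc", vdo), ("rag", vra), ("system", g vsy), ("knowledge", vkn), ("background", vba), ("other", vot)] := rfl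

theorem pv_mod_knowledge (vad vdo vra vsy vkn vba vot : List String) (g : List String → List String) :
    (PySem.Dict.mk [("admin", vad), ("doc", vdo), ("rag", vra), ("system", vsy), ("knowledge", vkn), ("background", vba), ("other", vot)]).modify "knowledge" [] g
    = PySem.Dict.mk [("admin", vad), ("doc", vdo), ("rag", vra), ("system", vsy), ("knowledge", g vkn), ("background", vba), ("other", vot)] := rfl

theorem pv_mod_background (vad vdo vra vsy vkn vba vot : List String) (g : List String → List String) :
    (PySem.Dict.mk [("admin", vad), ("doc", vdo), ("rag", vra), ("system", vsy), ("knowledge", vkn), ("background", vba), ("other", vot)]).modify "background" [] g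
    = PySem.Dict.mk [("admin", vad), ("doc", vdo), ("rag", vra), ("system", vsy), ("knowledge", vkn), ("background", g vba), ("other", vot)] := rfl

theorem pv_mod_other (vad vdo vra vsy vkn vba vot : List String) (g : List String → List String) :
    (PySem.Dict.mk [("admin", vad), ("doc", vdo), ("rag", vra), ("system", vsy), ("knowledge", vkn), ("background", vba), ("other", vot)]).modify "other" [] g
    = PySem.Dict.mk [("admin", vad), ("doc", vdo), ("rag", vra), ("system", vsy), ("knowledge", vkn), ("background", vba), ("other", g vot)] := rfl

theorem pv_items_fold (l : List String) (vad vdo vra vsy vkn vba vot : List String) :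
    (l.foldl (fun d file =>
      if PySem.Str.startswith file "admin_" then d.modify "admin" [] (· ++ [file])
      else if PySem.Str.isIn "doc" file || PySem.Str.isIn "document" file then d.modify "doc" [] (· ++ [file])
      else if PySem.Str.isIn "rag" file then d.modify "rag" [] (· ++ [file])
      else if PySem.Str.isIn "system" file || PySem.Str.isIn "monitor" file || PySem.Str.isIn "performance" file then d.modify "system" [] (· ++ [file])
      else if PySem.Str.isIn "knowledge" file then d.modify "knowledge" [] (· ++ [file])
      else if PySem.Str.isIn "background" file then d.modify "background" [] (· ++ [file])
      else d.modify "other" [] (· ++ [file]))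
      (PySem.Dict.mk [("admin", vad), ("doc", vdo), ("rag", vra), ("system", vsy),
                      ("knowledge", vkn), ("background", vba), ("other", vot)])).items
    = [("admin", vad ++ l.filter (fun f => pvClassify f == "admin")),
       ("doc", vdo ++ l.filter (fun f => pvClassify f == "doc")),
       ("rag", vra ++ l.filter (fun f => pvClassify f == "rag")),
       ("system", vsy ++ l.filter (fun f => pvClassify f == "system")),
       ("knowledge", vkn ++ l.filter (fun f => pvClassify f == "knowledge")),
       ("background", vba ++ l.filter (fun f => pvClassify f == "background")),
       ("other", vot ++ l.filter (fun f => pvClassify f == "other"))] := by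
  induction l generalizing vad vdo vra vsy vkn vba vot with
  | nil => simp
  | cons f t ih =>
    rw [List.foldl_cons]
    by_cases h1 : PySem.Str.startswith f "admin_" = true
    · rw [if_pos h1, pv_mod_admin, ih]
      have hc : pvClassify f = "admin" := by unfold pvClassify; rw [if_pos h1]
      simp [hc]
    · rw [if_neg h1]
      by_cases h2 : (PySem.Str.isIn "doc" f || PySem.Str.isIn "document" f) = true
      · rw [if_pos h2, pv_mod_doc, ih]
        have hc : pvClassify f = "doc" := by unfold pvClassify; rw [if_neg h1, if_pos h2]
        simp [hc]
      · rw [if_neg h2]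
        by_cases h3 : PySem.Str.isIn "rag" f = true
        · rw [if_pos h3, pv_mod_rag, ih]
          have hc : pvClassify f = "rag" := by unfold pvClassify; rw [if_neg h1, if_neg h2, if_pos h3]
          simp [hc]
        · rw [if_neg h3]
          by_cases h4 : (PySem.Str.isIn "system" f || PySem.Str.isIn "monitor" f || PySem.Str.isIn "performance" f) = true
          · rw [if_pos h4, pv_mod_system, ih]
            have hc : pvClassify f = "system" := by unfold pvClassify; rw [if_neg h1, if_neg h2, if_neg h3, if_pos h4]
            simp [hc]
          · rw [if_neg h4]
            by_cases h5 : PySem.Str.isIn "knowledge" f = true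
            · rw [if_pos h5, pv_mod_knowledge, ih]
              have hc : pvClassify f = "knowledge" := by unfold pvClassify; rw [if_neg h1, if_neg h2, if_neg h3, if_neg h4, if_pos h5]
              simp [hc]
            · rw [if_neg h5]
              by_cases h6 : PySem.Str.isIn "background" f = true
              · rw [if_pos h6, pv_mod_background, ih]
                have hc : pvClassify f = "background" := by unfold pvClassify; rw [if_neg h1, if_neg h2, if_neg h3, if_neg h4, if_neg h5, if_pos h6]
                simp [hc]
              · rw [if_neg h6, pv_mod_other, ih]
                have hc : pvClassify f = "other" := by unfold pvClassify; rw [if_neg h1, if_neg h2, if_neg h3, if_neg h4, if_neg h5, if_neg h6]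
                simp [hc]

-- A's outer category loop with its inner per-file loop, as init ++ flatMap
theorem pv_loop (items : List (String × List String)) (acc : List String)
    (hdr : String → String) (lines : String → String → List String) :
    items.foldl (fun acc cf =>
      if cf.2 ≠ [] then cf.2.foldl (fun a f => a ++ lines cf.1 f) (acc ++ [hdr cf.1]) else acc) acc
    = acc ++ items.flatMap (fun cf =>
        if cf.2 ≠ [] then hdr cf.1 :: cf.2.flatMap (lines cf.1) else []) := by
  induction items generalizing acc with
  | nil => simp
  | cons cf t ih =>
    rw [List.foldl_cons, List.flatMap_cons]
    by_cases h : cf.2 = []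
    · rw [if_neg (not_not_intro h), ih, if_neg (not_not_intro h)]
      simp
    · rw [if_pos h, if_pos h, PySem.List.foldl_append_eq_flatMap, ih]
      simp

-- ===== VERDICT (by name: the statement is the Claim_ definition above) =====
theorem generate_router_registration_code_spec : Claim_equal_generate_router_registration_code := by
  intro endpoint_files _
  unfold Spec_generate_router_registration_code
  unfold generate_router_registration_code generate_router_registration_code_alt
  dsimp only
  rw [show (PySem.Dict.ofList [("admin", ([] : List String)), ("doc", []), ("rag", []), ("system", []), ("knowledge", []), ("background", []), ("other", [])]) = PySem.Dict.mk [("admin", []), ("doc", []), ("rag", []), ("system", []), ("knowledge", []), ("background", []), ("other", [])] from rfl]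
  rw [pv_items_fold,
      pv_loop _ _ (fun c => "\n# " ++ PySem.Str.upper c ++ " endpoints") (fun _ file => pvImpLines file),
      pv_loop _ _ (fun c => "\n# Register " ++ PySem.Str.upper c ++ " endpoints") (fun c file => pvRegLines file (pvPrefixA file) c)]
  simp [pvOrder, show PySem.Str.upper "admin" = "ADMIN" from rfl, show PySem.Str.upper "doc" = "DOC" from rfl, show PySem.Str.upper "rag" = "RAG" from rfl, show PySem.Str.upper "system" = "SYSTEM" from rfl, show PySem.Str.upper "knowledge" = "KNOWLEDGE" from rfl, show PySem.Str.upper "background" = "BACKGROUND" from rfl, show PySem.Str.upper "other" = "OTHER" from rfl]
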